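-- pv_equiv track=rewrite | github.com/Udaychandra1999/Code | Practice/Python/String/EncryptTheString2.py | getStringEncrypt
-- ===== SOURCE A (Python) =====
-- def getStringEncrypt(s:str)->str:
--     d=dict()
--     for i in s:
--         if i not in d:
--             d[i] = 1
--         else:
--             d[i]+=1
--     res=""
--     for i in d.keys():
--         res+=i+str(hex(d[i])[2:])
--     return res
-- ===== SOURCE B (Python) =====
-- def getStringEncrypt(s: str) -> str:
--     # Peel off one character class per round: take the first remaining character,
--     # drop all its occurrences, and emit char + hex(number dropped).
--     cs = list(s)
--     out = []
--     while cs: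
--         c = cs[0]
--         rest = [x for x in cs if x != c]
--         out.append(c + hex(len(cs) - len(rest))[2:])
--         cs = rest
--     return "".join(out)
-- ===== Notes on version B (the rewrite author's own statement) =====
-- stated objective: alternative
-- what changed: A builds a frequency dict in one counting pass and then emits per key; B maintains no counts at all: it repeatedly peels off the first remaining character class, deriving its count as the length drop after filtering it out, shrinking the worklist each round.
import Mathlib
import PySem

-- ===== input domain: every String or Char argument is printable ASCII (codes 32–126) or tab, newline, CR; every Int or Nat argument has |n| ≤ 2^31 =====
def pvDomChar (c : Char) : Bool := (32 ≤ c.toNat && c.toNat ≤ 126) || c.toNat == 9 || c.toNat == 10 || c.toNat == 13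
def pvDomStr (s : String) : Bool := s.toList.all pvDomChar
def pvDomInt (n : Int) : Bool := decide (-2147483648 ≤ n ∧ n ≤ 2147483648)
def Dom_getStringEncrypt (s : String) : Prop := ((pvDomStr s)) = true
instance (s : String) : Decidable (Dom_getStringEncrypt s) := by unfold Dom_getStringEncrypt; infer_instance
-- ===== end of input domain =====

-- B keeps no counts: it peels off one character class per round (count = length drop after filtering); same result, no speed claim.

-- str(hex(n))[2:] for a nonnegative Python int n (counts here are ≥ 1): lowercase hex digits, exact on ℕ.
def pyHex (n : Int) : String := String.ofList (Nat.toDigits 16 n.toNat)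

-- ===== PORT A =====
def getStringEncrypt (s : String) : String :=
  let d := s.toList.foldl
    (fun d i => if d.contains i = false then d.insert i 1 else d.insert i (d.getD i 0 + 1))
    (PySem.Dict.empty : PySem.Dict Char Int)
  d.keys.foldl (fun res i => res ++ (String.ofList [i] ++ pyHex (d.getD i 0))) ""

-- ===== PORT B =====
-- the while loop of Source B: one round per distinct character, worklist shrinks each round
def encLoop (cs : List Char) (out : List String) : List String :=
  match cs with
  | [] => out
  | c :: t =>
    let rest := (c :: t).filter (fun x => !(x == c))
    encLoop rest (out ++ [String.ofList [c] ++ pyHex (((c :: t).length : Int) - (rest.length : Int))])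
termination_by cs.length
decreasing_by
  simp only [List.filter_cons, beq_self_eq_true, Bool.not_true, List.length_cons]
  exact Nat.lt_succ_of_le (List.length_filter_le _ _)

def getStringEncrypt_alt (s : String) : String :=
  String.join (encLoop s.toList [])

-- ===== PRECONDITION & SPEC =====
def Spec_getStringEncrypt (s : String) (out : String) : Prop := out = getStringEncrypt_alt s
instance (s : String) (out : String) : Decidable (Spec_getStringEncrypt s out) := by unfold Spec_getStringEncrypt; infer_instance

-- ===== CLAIM =====
def Claim_equal_getStringEncrypt : Prop := ∀ (s : String), Dom_getStringEncrypt s → Spec_getStringEncrypt s (getStringEncrypt s)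

-- ===== LEMMAS AND PROOFS =====

-- A's update loop is Counter: on a missing key getD gives 0, so both branches insert getD+1.
theorem loop_eq_counter (cs : List Char) :
    cs.foldl (fun d i => if d.contains i = false then d.insert i 1 else d.insert i (d.getD i 0 + 1))
      (PySem.Dict.empty : PySem.Dict Char Int) = PySem.Dict.counter cs := by
  rw [← PySem.Dict.foldl_insert_getD_add_one_eq_counter]
  congr 1
  funext d i
  by_cases h : d.contains i = false
  · have h2 : d.get? i = none := by
      have hc := PySem.Dict.contains_eq_isSome_get? d i
      rw [h] at hc
      exact Option.not_isSome_iff_eq_none.mp (by simp [← hc])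
    have : d.getD i 0 = 0 := by simp [PySem.Dict.getD, h2]
    simp [h, this]
  · simp [h]

theorem foldl_strings (l : List String) (a : String) :
    l.foldl (· ++ ·) a = a ++ l.foldl (· ++ ·) "" := by
  induction l generalizing a with
  | nil => simp
  | cons x xs ih =>
    rw [List.foldl_cons, List.foldl_cons, ih (a ++ x), ih ("" ++ x)]
    simp [String.append_assoc]

theorem foldl_append_eq_join (f : Char → String) (l : List Char) (a : String) :
    l.foldl (fun res i => res ++ f i) a = a ++ String.join (l.map f) := by
  rw [← List.foldl_map, String.join, foldl_strings]

-- Set.add-folding with any accumulator = accumulator ++ dedup of the not-yet-seen elements.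
theorem foldl_add_acc : ∀ (n : Nat) (t acc : List Char), t.length ≤ n →
    t.foldl PySem.Set.add acc
      = acc ++ (t.filter (fun x => !acc.contains x)).foldl PySem.Set.add ([] : PySem.Set Char) := by
  intro n
  induction n with
  | zero => intro t acc h; have : t = [] := List.length_eq_zero_iff.mp (Nat.le_zero.mp h); simp [this]
  | succ n ih =>
    intro t acc h
    cases t with
    | nil => simp
    | cons x t =>
      simp only [List.length_cons, Nat.succ_le_succ_iff] at h
      by_cases hm : x ∈ acc
      · have hadd : PySem.Set.add acc x = acc := by simp [PySem.Set.add, hm]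
        have hfc : (x :: t).filter (fun y => !acc.contains y) = t.filter (fun y => !acc.contains y) := by
          simp [hm]
        rw [List.foldl_cons, hadd, hfc]
        exact ih t acc h
      · have hadd : PySem.Set.add acc x = acc ++ [x] := by simp [PySem.Set.add, hm]
        have hfc : (x :: t).filter (fun y => !acc.contains y) = x :: t.filter (fun y => !acc.contains y) := by
          simp [hm]
        rw [List.foldl_cons, hadd, hfc, ih t (acc ++ [x]) h, List.foldl_cons]
        have h1 : PySem.Set.add ([] : PySem.Set Char) x = [x] := by simp [PySem.Set.add]
        rw [h1, ih (t.filter (fun y => !acc.contains y)) [x] (le_trans (List.length_filter_le _ _) h)]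
        have hfil : (t.filter (fun y => !acc.contains y)).filter (fun y => !([x].contains y))
            = t.filter (fun y => !(acc ++ [x]).contains y) := by
          rw [List.filter_filter]
          apply List.filter_congr
          intro y _
          by_cases h1 : y ∈ acc <;> by_cases h2 : y = x <;> simp [h1, h2]
        rw [hfil, List.append_assoc]

-- dedup peels its head exactly as B's loop does.
theorem dedup_cons (c : Char) (t : List Char) :
    PySem.List.dedup (c :: t) = c :: PySem.List.dedup (t.filter (fun x => !(x == c))) := by
  show (c :: t).foldl PySem.Set.add PySem.Set.empty
      = c :: (t.filter (fun x => !(x == c))).foldl PySem.Set.add PySem.Set.empty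
  have h1 : PySem.Set.add (PySem.Set.empty : PySem.Set Char) c = [c] := by
    simp [PySem.Set.add, PySem.Set.empty, PySem.Set.contains]
  rw [List.foldl_cons, h1, foldl_add_acc t.length t [c] le_rfl]
  have : t.filter (fun y => !([c].contains y)) = t.filter (fun x => !(x == c)) := by
    apply List.filter_congr
    intro y _
    simp [beq_eq_decide, eq_comm]
  rw [this]
  rfl

theorem length_filter_ne (t : List Char) (c : Char) :
    (t.filter (fun x => !(x == c))).length = t.length - t.count c := by
  induction t with
  | nil => simp
  | cons a t ih =>
    have hle : t.count c ≤ t.length := List.count_le_length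
    by_cases h : a = c <;> simp [h, ih] <;> omega

-- B's loop = dedup-ordered emission with whole-list counts (what A reduces to).
theorem encLoop_eq : ∀ (n : Nat) (cs : List Char) (out : List String), cs.length ≤ n →
    encLoop cs out
      = out ++ (PySem.List.dedup cs).map (fun c => String.ofList [c] ++ pyHex ((cs.count c : Int))) := by
  intro n
  induction n with
  | zero =>
    intro cs out h
    have : cs = [] := List.length_eq_zero_iff.mp (Nat.le_zero.mp h)
    simp [this, encLoop, PySem.List.dedup, PySem.Set.ofList]
  | succ n ih =>
    intro cs out h
    cases cs with
    | nil => simp [encLoop, PySem.List.dedup, PySem.Set.ofList]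
    | cons c t =>
      simp only [List.length_cons, Nat.succ_le_succ_iff] at h
      have hrest : (c :: t).filter (fun x => !(x == c)) = t.filter (fun x => !(x == c)) := by
        simp [List.filter_cons]
      rw [encLoop, hrest]
      rw [ih _ _ (le_trans (List.length_filter_le _ _) h)]
      rw [dedup_cons, List.map_cons, List.append_assoc]
      congr 1
      have hcount : t.count c ≤ t.length := List.count_le_length
      have hlen := length_filter_ne t c
      have hhex : ((c :: t).length : Int) - ((t.filter (fun x => !(x == c))).length : Int)
          = (((c :: t).count c : Nat) : Int) := by
        simp only [List.length_cons, hlen, List.count_cons_self]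
        push_cast [Nat.sub_sub_self hcount]
        omega
      rw [hhex]
      simp only [List.cons_append, List.nil_append]
      congr 1
      apply List.map_congr_left
      intro d hd
      have hdne : ¬ d = c := by
        have : d ∈ t.filter (fun x => !(x == c)) :=
          (PySem.List.mem_dedup _ _).mp hd
        have := List.of_mem_filter this
        simpa using this
      have h1 : (t.filter (fun x => !(x == c))).count d = t.count d := by
        rw [List.count_filter]
        simp [hdne]
      have h2 : (c :: t).count d = t.count d := by
        rw [List.count_cons]
        simp [Ne.symm hdne]
      rw [h1, h2]

-- ===== VERDICT =====
theorem getStringEncrypt_spec : Claim_equal_getStringEncrypt := by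
  intro s _
  unfold Spec_getStringEncrypt getStringEncrypt getStringEncrypt_alt
  simp only [loop_eq_counter, PySem.Dict.keys_counter, ← PySem.List.dedup_eq_ofList,
    PySem.Dict.getD_counter, foldl_append_eq_join]
  rw [encLoop_eq s.toList.length s.toList [] le_rfl]
  simp
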